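-- pv_equiv track=rewrite | github.com/chrisjdavie/compsci_basics | tree/reverse_odd_levels_perfect_bt/bfs.py | build_node_descr
-- ===== SOURCE A (Python) =====
-- from string import ascii_letters
-- from itertools import cycle, tee, chain, accumulate, count, islice
-- from string import ascii_letters
--
-- def character_iterator(switch=False):
--     """
--     Returns a BFS representation of the trees above.
--
--     If not switch, produces "Given", if switch, produces "Modified"
--     """
--     this, p1 = tee(chain([0],accumulate([2**i for i in range(1000)])))
--     next(p1)
--     for level, i_l0, i_r0 in zip(count(), this, p1):
--         i_l, i_r, di = i_l0, i_r0, 1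
--         if switch and level%2:
--             i_l, i_r, di = i_r-1, i_l-1, -1
--         for lett in ascii_letters[i_l:i_r:di]:
--             yield(lett)
--
-- def build_node_descr(levels, switch=False):
--     """
--     Produces a node description of the above binary trees
--     """
--     num_parents = sum([2**i for i in range(levels-1)])
--     parents, children = tee(character_iterator(switch))
--     next(children)
--     node_descr = []
--     for parent_ident in islice(parents, num_parents):
--         node_descr.append((parent_ident, next(children), "L"))
--         node_descr.append((parent_ident, next(children), "R"))
--     return node_descr
-- ===== SOURCE B (Python) =====
-- from string import ascii_letters
--
--
-- def build_node_descr(levels, switch=False):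
--     """
--     Produces a node description of the binary trees by direct array indexing:
--     BFS labels are the per-level segments of ascii_letters (odd levels reversed
--     when switch), and the children of node i sit at positions 2*i+1 and 2*i+2.
--     """
--     n = len(ascii_letters)
--     labels = []
--     start, level = 0, 0
--     while start < n:
--         end = min(2 * start + 1, n)
--         seg = ascii_letters[start:end]
--         if switch and level % 2:
--             seg = seg[::-1]
--         labels.extend(seg)
--         start, level = end, level + 1
--     num_parents = 2 ** (levels - 1) - 1 if levels >= 1 else 0
--     node_descr = []
--     for i in range(num_parents):
--         node_descr.append((labels[i], labels[2 * i + 1], "L"))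
--         node_descr.append((labels[i], labels[2 * i + 2], "R"))
--     return node_descr
-- ===== Notes on version B (the rewrite author's own statement) =====
-- stated objective: simpler
-- what changed: A threads four chained lazy iterators (tee/chain/accumulate/count/islice) and consumes two teed copies in lockstep; B materializes the label list once from per-level slices of ascii_letters and pairs each parent i directly with its children at array positions 2*i+1 and 2*i+2, with num_parents computed in closed form as 2**(levels-1)-1.
import Mathlib
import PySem

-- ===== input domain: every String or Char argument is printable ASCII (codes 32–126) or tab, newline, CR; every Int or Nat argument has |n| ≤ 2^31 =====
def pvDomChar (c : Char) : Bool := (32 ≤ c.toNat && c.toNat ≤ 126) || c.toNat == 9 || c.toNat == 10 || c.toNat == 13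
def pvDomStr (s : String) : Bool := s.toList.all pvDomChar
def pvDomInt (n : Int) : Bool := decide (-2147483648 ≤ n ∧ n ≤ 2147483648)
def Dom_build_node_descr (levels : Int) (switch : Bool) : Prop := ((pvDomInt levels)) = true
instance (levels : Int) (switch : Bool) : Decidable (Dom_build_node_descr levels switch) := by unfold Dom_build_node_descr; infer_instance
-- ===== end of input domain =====

-- B replaces A's four chained lazy iterators by one materialized label list and
-- direct child indexing (children of node i at 2*i+1, 2*i+2): simpler.

-- ascii_letters, as a list of code points
def pvAscii : List Char :=
  ['a','b','c','d','e','f','g','h','i','j','k','l','m','n','o','p','q','r','s','t','u','v','w','x','y','z','A','B','C','D','E','F','G','H','I','J','K','L','M','N','O','P','Q','R','S','T','U','V','W','X','Y','Z']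

-- ===== PORT A =====
-- accumulate(xs): running sums, as Python's itertools.accumulate
def pvAccumulate (xs : List Int) (acc : Int) : List Int :=
  match xs with
  | [] => []
  | x :: rest => (acc + x) :: pvAccumulate rest (acc + x)

-- the finite character stream of character_iterator(switch): zip(count(), this, p1)
-- runs for the 1000 levels of range(1000); each level contributes
-- ascii_letters[i_l:i_r:di] (an empty slice once the letters are exhausted)
def pvCharIter (switch : Bool) : List Char :=
  let acc := pvAccumulate ((PySem.List.pyRange 0 1000 1).map (fun i => (2:Int) ^ i.toNat)) 0
  let this := 0 :: acc                       -- chain([0], accumulate(...)) , teed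
  let p1 := this.drop 1                      -- next(p1)
  (PySem.List.enumerate (this.zip p1) 0).foldl
    (fun out lvl =>
      let level := lvl.1
      let i_l0 := lvl.2.1
      let i_r0 := lvl.2.2
      let (i_l, i_r, di) :=
        if switch && PySem.Int.mod level 2 != 0 then (i_r0 - 1, i_l0 - 1, (-1 : Int))
        else (i_l0, i_r0, (1 : Int))
      -- ascii_letters[i_l:i_r:di]; di = ±1 so slice? is always some
      out ++ ((PySem.List.slice? pvAscii (some i_l) (some i_r) di).getD []))
    []

def build_node_descr (levels : Int) (switch : Bool) : List (String × String × String) :=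
  let num_parents := ((PySem.List.pyRange 0 (levels - 1) 1).map (fun i => (2:Int) ^ i.toNat)).sum
  let cs := pvCharIter switch
  let parents := cs
  let children := cs.drop 1                  -- tee + next(children)
  -- for parent_ident in islice(parents, num_parents): two next(children) per step;
  -- next(children) past the end is a StopIteration, excluded by Pre_ (default 'a' unreachable there)
  ((parents.take num_parents.toNat).foldl
    (fun (st : List (String × String × String) × Nat) p =>
      (st.1 ++ [(String.ofList [p], String.ofList [children.getD st.2 'a'], "L"),
                (String.ofList [p], String.ofList [children.getD (st.2 + 1) 'a'], "R")],
       st.2 + 2))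
    ([], 0)).1

-- ===== PORT B =====
-- the while loop of Source B: per-level segments of ascii_letters, odd levels reversed if switch
-- (fuel-structured so the kernel reduces it; 52 iterations always suffice since
-- start strictly increases towards 52)
def pvLabels (switch : Bool) : Nat → Nat → Nat → List Char
  | 0, _, _ => []
  | fuel + 1, start, level =>
    if start < 52 then
      let stop := min (2 * start + 1) 52
      let seg := PySem.List.slice pvAscii (some (start : Int)) (some (stop : Int))
      let seg := if switch && level % 2 = 1 then seg.reverse else seg   -- seg[::-1] (PySem.List.slice?_none_none_neg_one)
      seg ++ pvLabels switch fuel stop (level + 1)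
    else []

def build_node_descr_alt (levels : Int) (switch : Bool) : List (String × String × String) :=
  let labels := pvLabels switch 52 0 0
  let num_parents : Int := if levels ≥ 1 then 2 ^ (levels - 1).toNat - 1 else 0
  -- labels[…] is Python list indexing; out of range is an IndexError, excluded by
  -- Pre_ (the 'a' default is unreachable there)
  (PySem.List.pyRange 0 num_parents 1).foldl
    (fun out i =>
      out ++ [(String.ofList [PySem.List.pyGetD labels i 'a'], String.ofList [PySem.List.pyGetD labels (2 * i + 1) 'a'], "L"),
              (String.ofList [PySem.List.pyGetD labels i 'a'], String.ofList [PySem.List.pyGetD labels (2 * i + 2) 'a'], "R")])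
    []

-- ===== PRECONDITION & SPEC =====
-- Pre_ excludes exactly levels ≥ 6, where A raises StopIteration (the 52 ascii letters
-- cannot fill 63 or more nodes); B raises IndexError there.
def Pre_build_node_descr (levels : Int) (switch : Bool) : Prop := levels ≤ 5
instance (levels : Int) (switch : Bool) : Decidable (Pre_build_node_descr levels switch) := by unfold Pre_build_node_descr; infer_instance
def pvWitness_build_node_descr : Int × Bool := (5, true)

def Spec_build_node_descr (levels : Int) (switch : Bool) (out : List (String × String × String)) : Prop := out = build_node_descr_alt levels switch
instance (levels : Int) (switch : Bool) (out : List (String × String × String)) : Decidable (Spec_build_node_descr levels switch out) := by unfold Spec_build_node_descr; infer_instance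

-- ===== CLAIM (what is proved, stated in full; the proofs are below) =====
def Claim_equal_build_node_descr : Prop := ∀ (levels : Int) (switch : Bool), Dom_build_node_descr levels switch → Pre_build_node_descr levels switch → Spec_build_node_descr levels switch (build_node_descr levels switch)

-- ===== LEMMAS AND PROOFS =====
lemma pv_trivial_A (levels : Int) (h : levels ≤ 1) (switch : Bool) :
    build_node_descr levels switch = [] := by
  simp only [build_node_descr]
  rw [PySem.List.pyRange_one]
  have h0 : levels.toNat - 1 = 0 := by omega
  simp [h0]

lemma pv_trivial_B (levels : Int) (h : levels ≤ 1) (switch : Bool) :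
    build_node_descr_alt levels switch = [] := by
  by_cases hl : levels = 1
  · subst hl; cases switch <;> decide
  · have hlt : ¬ (levels ≥ 1) := by omega
    simp only [build_node_descr_alt, if_neg hlt]
    rw [PySem.List.pyRange_one]
    simp

-- ===== VERDICT (by name: the statement is the Claim_ definition above) =====
set_option maxRecDepth 10000 in
theorem build_node_descr_spec : Claim_equal_build_node_descr := by
  intro levels switch _ hpre
  unfold Spec_build_node_descr
  by_cases h1 : levels ≤ 1
  · rw [pv_trivial_A levels h1 switch, pv_trivial_B levels h1 switch]
  · have h2 : 2 ≤ levels := by omega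
    have h5 : levels ≤ 5 := hpre
    interval_cases levels <;> cases switch <;> decide
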